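-- pv_equiv track=rewrite | github.com/woaifzb/lof-fund-website | get_official_lof_data.py | merge_funds
-- ===== SOURCE A (Python) =====
-- def merge_funds(sse_funds, szse_funds):
--     """合并两个交易所的数据"""
--     # 使用字典去重
--     merged = {}
--
--     # 添加上交所数据
--     for fund in sse_funds:
--         code = fund['code']
--         if code not in merged:
--             merged[code] = fund
--
--     # 添加深交所数据（优先使用非空值）
--     for fund in szse_funds:
--         code = fund['code']
--         if code in merged:
--             # 合并数据，优先保留非空值
--             existing = merged[code]
--             for key, value in fund.items():
--                 if value and not existing[key]:
--                     existing[key] = value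
--         else:
--             merged[code] = fund
--
--     # 转换为列表并排序
--     result = list(merged.values())
--     result.sort(key=lambda x: x['code'])
--
--     return result
-- ===== SOURCE B (Python) =====
-- def merge_funds(sse_funds, szse_funds):
--     """合并两个交易所的数据 (no dict index: sorted unique codes, then per-code scans)"""
--     funds = sse_funds + szse_funds
--     codes = sorted({f['code'] for f in funds})
--     result = []
--     for code in codes:
--         base = next((f for f in sse_funds if f['code'] == code), None)
--         zs = [z for z in szse_funds if z['code'] == code]
--         if base is None:
--             base = zs[0]
--             zs = zs[1:]
--         for z in zs:
--             for key, value in z.items():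
--                 if value and not base[key]:
--                     base[key] = value
--         result.append(base)
--     return result
-- ===== Notes on version B (the rewrite author's own statement) =====
-- stated objective: alternative
-- what changed: A builds one dedup dict by insert-or-merge while scanning both lists and sorts its values at the end; B never indexes: it first computes the sorted set of codes, then for each code scans the sse list for the first match (the base) and filters the szse list, folding those matches' non-empty fields into the base.
import Mathlib
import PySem

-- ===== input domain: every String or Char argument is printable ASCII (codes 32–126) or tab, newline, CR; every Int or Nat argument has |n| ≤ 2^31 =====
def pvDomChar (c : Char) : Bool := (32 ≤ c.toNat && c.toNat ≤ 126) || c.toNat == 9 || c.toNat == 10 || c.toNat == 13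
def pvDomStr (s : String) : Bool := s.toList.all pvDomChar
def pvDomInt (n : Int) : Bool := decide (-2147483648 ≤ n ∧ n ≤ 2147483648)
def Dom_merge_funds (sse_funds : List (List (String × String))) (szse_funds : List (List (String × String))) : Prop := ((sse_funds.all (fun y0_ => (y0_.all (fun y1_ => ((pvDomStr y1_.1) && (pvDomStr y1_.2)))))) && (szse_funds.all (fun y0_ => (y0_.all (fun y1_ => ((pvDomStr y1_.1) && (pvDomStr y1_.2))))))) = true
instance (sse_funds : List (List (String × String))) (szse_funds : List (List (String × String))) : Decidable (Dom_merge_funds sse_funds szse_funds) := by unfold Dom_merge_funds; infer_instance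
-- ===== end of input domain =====

-- B drops A's incremental dedup dict entirely: it sorts the set of codes first, then for each code
-- scans the two source lists (find first sse match / filter szse matches) and folds the szse
-- matches' non-empty fields into the base (alternative decomposition: per-code scans, no index).
-- Both Pythons mutate the input fund dicts in place; the equivalence proved is about the RETURN value only.


-- each Python fund parameter is a dict; its Lean argument is the association list it was built from
def pvDictOf (f : List (String × String)) : PySem.Dict String String := PySem.Dict.ofList f

-- ===== PORT A =====
def merge_funds (sse_funds : List (List (String × String))) (szse_funds : List (List (String × String))) : List (List (String × String)) :=
  let merged : PySem.Dict String (PySem.Dict String String) :=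
    sse_funds.foldl (fun merged f =>
      let fund := pvDictOf f
      let code := fund.getD "code" ""
      if merged.contains code then merged else merged.insert code fund) PySem.Dict.empty
  let merged := szse_funds.foldl (fun merged f =>
      let fund := pvDictOf f
      let code := fund.getD "code" ""
      if merged.contains code then
        let existing := merged.getD code PySem.Dict.empty
        let existing := fund.items.foldl (fun ex kv =>
          if kv.2 ≠ "" ∧ ex.getD kv.1 "" = "" then ex.insert kv.1 kv.2 else ex) existing
        merged.insert code existing
      else merged.insert code fund) merged
  let result := merged.values
  let result := PySem.List.sorted result (fun x => x.getD "code" "") false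
  result.map (fun d => d.items)

-- ===== PORT B =====
def merge_funds_alt (sse_funds : List (List (String × String))) (szse_funds : List (List (String × String))) : List (List (String × String)) :=
  let funds := (sse_funds ++ szse_funds).map pvDictOf
  let codes := PySem.List.sorted (PySem.Set.ofList (funds.map (fun f => f.getD "code" ""))) (fun c => c) false
  codes.foldl (fun result code =>
    let baseOpt := (sse_funds.map pvDictOf).find? (fun f => f.getD "code" "" == code)
    let zsAll := (szse_funds.map pvDictOf).filter (fun z => z.getD "code" "" == code)
    let bz : PySem.Dict String String × List (PySem.Dict String String) :=
      match baseOpt with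
      | some b => (b, zsAll)
      | none => (zsAll.headD PySem.Dict.empty, zsAll.tail)   -- zs[0]; never defaults: the code came from some fund
    let base := bz.2.foldl (fun base z =>
      z.items.foldl (fun b kv => if kv.2 ≠ "" ∧ b.getD kv.1 "" = "" then b.insert kv.1 kv.2 else b) base) bz.1
    result ++ [base.items]) []

-- ===== PRECONDITION & SPEC =====
-- Pre_ excludes exactly the inputs where Python A raises KeyError: a fund without key 'code', or a
-- szse fund carrying a non-empty value under a key absent from the first earlier fund of its code.
def Pre_merge_funds (sse_funds : List (List (String × String))) (szse_funds : List (List (String × String))) : Prop :=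
  (∀ f ∈ sse_funds ++ szse_funds, (pvDictOf f).contains "code" = true) ∧
  (∀ i : Fin szse_funds.length,
    ∀ b ∈ (((sse_funds ++ szse_funds.take i).map pvDictOf).find?
             (fun d => d.getD "code" "" == (pvDictOf szse_funds[i]).getD "code" "")),
      ∀ kv ∈ (pvDictOf szse_funds[i]).items, kv.2 ≠ "" → b.contains kv.1 = true)
instance (sse_funds : List (List (String × String))) (szse_funds : List (List (String × String))) : Decidable (Pre_merge_funds sse_funds szse_funds) := by unfold Pre_merge_funds; infer_instance
def pvWitness_merge_funds : (List (List (String × String))) × (List (List (String × String))) :=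
  ([[("code", "501000"), ("name", "a")]], [[("code", "501000"), ("name", "")], [("code", "501001")]])

def Spec_merge_funds (sse_funds : List (List (String × String))) (szse_funds : List (List (String × String))) (out : List (List (String × String))) : Prop := out = merge_funds_alt sse_funds szse_funds
instance (sse_funds : List (List (String × String))) (szse_funds : List (List (String × String))) (out : List (List (String × String))) : Decidable (Spec_merge_funds sse_funds szse_funds out) := by unfold Spec_merge_funds; infer_instance

-- ===== CLAIM (what is proved, stated in full; the proofs are below) =====
def Claim_equal_merge_funds : Prop := ∀ (sse_funds : List (List (String × String))) (szse_funds : List (List (String × String))), Dom_merge_funds sse_funds szse_funds → Pre_merge_funds sse_funds szse_funds → Spec_merge_funds sse_funds szse_funds (merge_funds sse_funds szse_funds)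

-- ===== LEMMAS AND PROOFS =====

-- the inner merge loop shared by both Pythons: fold z's non-empty values into b where b is empty
def pvMergeZ (b z : PySem.Dict String String) : PySem.Dict String String :=
  z.items.foldl (fun b kv => if kv.2 ≠ "" ∧ b.getD kv.1 "" = "" then b.insert kv.1 kv.2 else b) b

-- the merged object A ends up holding for one code, expressed over the code's group of tagged funds
def pvCollapse (grp : List (Bool × PySem.Dict String String)) : PySem.Dict String String :=
  grp.foldl (fun base p => if p.1 then pvMergeZ base p.2 else base) ((grp.headD (true, PySem.Dict.empty)).2)

-- A's loop body, over a tagged fund (tag = true means szse)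
def pvStepA (m : PySem.Dict String (PySem.Dict String String)) (p : Bool × PySem.Dict String String) :
    PySem.Dict String (PySem.Dict String String) :=
  let code := p.2.getD "code" ""
  if p.1 then
    if m.contains code then m.insert code (pvMergeZ (m.getD code PySem.Dict.empty) p.2)
    else m.insert code p.2
  else
    if m.contains code then m else m.insert code p.2

-- the grouping fold (proof device relating A's dict to per-code groups)
def pvStepB (g : PySem.Dict String (List (Bool × PySem.Dict String String)))
    (p : Bool × PySem.Dict String String) : PySem.Dict String (List (Bool × PySem.Dict String String)) :=
  g.modify (p.2.getD "code" "") [] (fun l => l ++ [p])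

def pvF (q : String × List (Bool × PySem.Dict String String)) : String × PySem.Dict String String :=
  (q.1, pvCollapse q.2)

def pvGInv (g : PySem.Dict String (List (Bool × PySem.Dict String String))) : Prop :=
  g.keys.Nodup ∧ ∀ q ∈ g.items, q.2 ≠ [] ∧ ∀ p ∈ q.2, p.2.keys.Nodup ∧ p.2.getD "code" "" = q.1

-- B's per-code value (the body of merge_funds_alt's loop, as a function of the code)
def pvBcore (baseOpt : Option (PySem.Dict String String)) (zsAll : List (PySem.Dict String String)) :
    List (String × String) :=
  let bz : PySem.Dict String String × List (PySem.Dict String String) :=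
    match baseOpt with
    | some b => (b, zsAll)
    | none => (zsAll.headD PySem.Dict.empty, zsAll.tail)
  (bz.2.foldl (fun base z => pvMergeZ base z) bz.1).items

def pvBval (sse_funds : List (List (String × String))) (szse_funds : List (List (String × String)))
    (code : String) : List (String × String) :=
  pvBcore ((sse_funds.map pvDictOf).find? (fun f => f.getD "code" "" == code))
    ((szse_funds.map pvDictOf).filter (fun z => z.getD "code" "" == code))

lemma pv_foldl_merge_id (l : List (String × String)) (d : PySem.Dict String String)
    (h : ∀ kv ∈ l, d.get? kv.1 = some kv.2) :
    l.foldl (fun b kv => if kv.2 ≠ "" ∧ b.getD kv.1 "" = "" then b.insert kv.1 kv.2 else b) d = d := by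
  induction l with
  | nil => rfl
  | cons kv t ih =>
    have hkv := h kv (List.mem_cons_self)
    have hd : d.getD kv.1 "" = kv.2 := PySem.Dict.getD_of_get?_eq_some d "" hkv
    simp only [List.foldl_cons]
    rw [if_neg (by rw [hd]; tauto)]
    exact ih fun q hq => h q (List.mem_cons_of_mem _ hq)

lemma pvMergeZ_self (d : PySem.Dict String String) (hd : d.keys.Nodup) : pvMergeZ d d = d := by
  unfold pvMergeZ
  exact pv_foldl_merge_id d.items d fun kv hkv =>
    PySem.Dict.get?_of_mem_items d (by exact hkv) hd

lemma pv_foldl_merge_code (l : List (String × String)) (c : String)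
    (hl : ∀ kv ∈ l, kv.1 = "code" → kv.2 = c) :
    ∀ b : PySem.Dict String String, b.getD "code" "" = c →
      (l.foldl (fun b kv => if kv.2 ≠ "" ∧ b.getD kv.1 "" = "" then b.insert kv.1 kv.2 else b) b).getD "code" "" = c := by
  induction l with
  | nil => intro b hb; exact hb
  | cons kv t ih =>
    intro b hb
    simp only [List.foldl_cons]
    refine ih (fun q hq => hl q (List.mem_cons_of_mem _ hq)) _ ?_
    by_cases hif : kv.2 ≠ "" ∧ b.getD kv.1 "" = ""
    · rw [if_pos hif]
      by_cases hk : kv.1 = "code"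
      · have hv := hl kv (List.mem_cons_self) hk
        rw [hk, PySem.Dict.getD_insert_self]
        exact hv
      · rw [PySem.Dict.getD_insert_of_ne _ _ _ (fun hne => hk hne.symm)]
        exact hb
    · rw [if_neg hif]; exact hb

lemma pvMergeZ_code (b z : PySem.Dict String String) (c : String) (hz : z.keys.Nodup)
    (hzc : z.getD "code" "" = c) (hb : b.getD "code" "" = c) :
    (pvMergeZ b z).getD "code" "" = c := by
  unfold pvMergeZ
  refine pv_foldl_merge_code z.items c ?_ b hb
  intro kv hkv hk
  have : z.getD kv.1 "" = kv.2 := PySem.Dict.getD_of_mem_items z (by exact hkv) hz ""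
  rw [hk] at this
  rw [← this, hzc]

lemma pvCollapse_code (grp : List (Bool × PySem.Dict String String)) (c : String) (hne : grp ≠ [])
    (hmem : ∀ p ∈ grp, p.2.keys.Nodup ∧ p.2.getD "code" "" = c) :
    (pvCollapse grp).getD "code" "" = c := by
  match grp, hne with
  | a :: t, _ =>
    unfold pvCollapse
    simp only [List.headD_cons, List.foldl_cons]
    have haux : ∀ (l : List (Bool × PySem.Dict String String)),
        (∀ p ∈ l, p.2.keys.Nodup ∧ p.2.getD "code" "" = c) →
        ∀ b : PySem.Dict String String, b.getD "code" "" = c →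
        (l.foldl (fun base p => if p.1 then pvMergeZ base p.2 else base) b).getD "code" "" = c := by
      intro l
      induction l with
      | nil => intro _ b hb; exact hb
      | cons q u ih =>
        intro hm b hb
        simp only [List.foldl_cons]
        refine ih (fun p hp => hm p (List.mem_cons_of_mem _ hp)) _ ?_
        by_cases hq : q.1 = true
        · rw [if_pos hq]
          exact pvMergeZ_code b q.2 c (hm q (List.mem_cons_self)).1 (hm q (List.mem_cons_self)).2 hb
        · rw [if_neg hq]; exact hb
    have ha := hmem a (List.mem_cons_self)
    refine haux t (fun p hp => hmem p (List.mem_cons_of_mem _ hp)) _ ?_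
    by_cases hq : a.1 = true
    · rw [if_pos hq]; exact pvMergeZ_code a.2 a.2 c ha.1 ha.2 ha.2
    · rw [if_neg hq]; exact ha.2

lemma pvCollapse_snoc (grp : List (Bool × PySem.Dict String String)) (p : Bool × PySem.Dict String String)
    (hne : grp ≠ []) :
    pvCollapse (grp ++ [p]) = if p.1 then pvMergeZ (pvCollapse grp) p.2 else pvCollapse grp := by
  match grp, hne with
  | a :: t, _ =>
    unfold pvCollapse
    simp only [List.cons_append, List.headD_cons, List.foldl_append, List.foldl_cons, List.foldl_nil]

lemma pvCollapse_single (p : Bool × PySem.Dict String String) (hp : p.2.keys.Nodup) :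
    pvCollapse [p] = p.2 := by
  unfold pvCollapse
  simp only [List.headD_cons, List.foldl_cons, List.foldl_nil]
  by_cases hq : p.1 = true
  · rw [if_pos hq]; exact pvMergeZ_self p.2 hp
  · rw [if_neg hq]

lemma pv_keys_eq (m : PySem.Dict String (PySem.Dict String String))
    (g : PySem.Dict String (List (Bool × PySem.Dict String String)))
    (h : m.items = g.items.map pvF) : m.keys = g.keys := by
  show m.items.map Prod.fst = g.items.map Prod.fst
  rw [h, List.map_map]
  rfl

lemma pv_inv (l : List (Bool × PySem.Dict String String)) :
    ∀ (m : PySem.Dict String (PySem.Dict String String))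
      (g : PySem.Dict String (List (Bool × PySem.Dict String String))),
      (∀ p ∈ l, p.2.keys.Nodup) → pvGInv g → m.items = g.items.map pvF →
      pvGInv (l.foldl pvStepB g) ∧ (l.foldl pvStepA m).items = (l.foldl pvStepB g).items.map pvF := by
  induction l with
  | nil => intro m g _ hg hmg; exact ⟨hg, hmg⟩
  | cons p t ih =>
    intro m g hl hg hmg
    obtain ⟨hgk, hgq⟩ := hg
    have hpnd : p.2.keys.Nodup := hl p List.mem_cons_self
    have htl : ∀ q ∈ t, q.2.keys.Nodup := fun q hq => hl q (List.mem_cons_of_mem _ hq)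
    have hmk : m.keys = g.keys := pv_keys_eq m g hmg
    have hmknd : m.keys.Nodup := by rw [hmk]; exact hgk
    set c := p.2.getD "code" "" with hcdef
    have hcont : m.contains c = g.contains c := by
      rw [PySem.Dict.contains_eq_decide_mem_keys, PySem.Dict.contains_eq_decide_mem_keys, hmk]
    have hstepB : pvStepB g p = g.insert c (g.getD c [] ++ [p]) := rfl
    simp only [List.foldl_cons]
    by_cases hgc : g.contains c = true
    · -- code already present
      have hmc : m.contains c = true := by rw [hcont]; exact hgc
      have hckeys : c ∈ g.keys := (PySem.Dict.contains_iff_mem_keys g c).mp hgc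
      have hget? : g.get? c = some (g.getD c []) := by
        cases hgg : g.get? c with
        | none => exact absurd ((PySem.Dict.get?_eq_none_iff_not_mem_keys g c).mp hgg) (by simp [hckeys])
        | some v => rw [PySem.Dict.getD_of_get?_eq_some _ _ hgg]
      have hmemg : (c, g.getD c []) ∈ g.items := PySem.Dict.mem_items_of_get?_eq_some g hget?
      have hgrp := hgq _ hmemg
      have hmemm : (c, pvCollapse (g.getD c [])) ∈ m.items := by
        rw [hmg]; exact List.mem_map_of_mem hmemg
      have hmval : m.getD c PySem.Dict.empty = pvCollapse (g.getD c []) :=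
        PySem.Dict.getD_of_mem_items m hmemm hmknd _
      have hgB : (pvStepB g p).items
          = g.items.map (fun q => if (q.1 == c) = true then (c, g.getD c [] ++ [p]) else q) := by
        rw [hstepB]; exact PySem.Dict.items_insert_of_contains g _ hgc
      have hkeysB : (pvStepB g p).keys = g.keys := by
        rw [hstepB]; exact PySem.Dict.keys_insert_of_contains g _ hgc
      have hInvB : pvGInv (pvStepB g p) := by
        refine ⟨by rw [hkeysB]; exact hgk, ?_⟩
        intro q hq
        rw [hgB] at hq
        obtain ⟨q0, hq0, hq0e⟩ := List.mem_map.mp hq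
        by_cases he : (q0.1 == c) = true
        · rw [if_pos he] at hq0e
          subst hq0e
          refine ⟨by simp, ?_⟩
          intro r hr
          rcases List.mem_append.mp hr with hr1 | hr2
          · exact hgrp.2 r hr1
          · rw [List.mem_singleton.mp hr2]
            exact ⟨hpnd, rfl⟩
        · rw [if_neg he] at hq0e
          subst hq0e
          exact hgq q0 hq0
      have hq02 : ∀ q0 ∈ g.items, (q0.1 == c) = true → q0.2 = g.getD c [] := by
        intro q0 hq0 he
        have hq01 : q0.1 = c := by simpa using he
        have := PySem.Dict.getD_of_mem_items g (k := q0.1) (v := q0.2) hq0 hgk []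
        rw [hq01] at this
        rw [← this]
      by_cases hp1 : p.1 = true
      · have hstepA : pvStepA m p = m.insert c (pvMergeZ (m.getD c PySem.Dict.empty) p.2) := by
          simp [pvStepA, hp1, hmc, ← hcdef]
        have hrel : (pvStepA m p).items = (pvStepB g p).items.map pvF := by
          rw [hstepA, PySem.Dict.items_insert_of_contains m _ hmc, hgB, hmg,
            List.map_map, List.map_map]
          refine List.map_congr_left ?_
          intro q0 hq0
          by_cases he : (q0.1 == c) = true
          · have h2 := hq02 q0 hq0 he
            simp only [Function.comp, pvF, he, if_pos, h2]
            rw [pvCollapse_snoc _ p hgrp.1, if_pos hp1, hmval]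
          · simp [Function.comp, pvF, he]
        exact ih _ _ htl hInvB hrel
      · have hstepA : pvStepA m p = m := by
          simp [pvStepA, hp1, hmc, ← hcdef]
        have hrel : (pvStepA m p).items = (pvStepB g p).items.map pvF := by
          rw [hstepA, hgB, hmg, List.map_map]
          refine List.map_congr_left ?_
          intro q0 hq0
          by_cases he : (q0.1 == c) = true
          · have h2 := hq02 q0 hq0 he
            have hq01 : q0.1 = c := by simpa using he
            simp only [Function.comp, pvF, he, if_pos]
            rw [pvCollapse_snoc _ p hgrp.1, if_neg hp1, ← h2, ← hq01]
          · simp [Function.comp, pvF, he]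
        exact ih _ _ htl hInvB hrel
    · -- new code
      have hgcf : g.contains c = false := by simpa using hgc
      have hmcf : m.contains c = false := by rw [hcont]; exact hgcf
      have hgD : g.getD c [] = [] := PySem.Dict.getD_of_not_contains g [] hgcf
      have hgB : (pvStepB g p).items = g.items ++ [(c, [p])] := by
        rw [hstepB, PySem.Dict.items_insert_of_not_contains g _ hgcf, hgD]
        rfl
      have hckeys : c ∉ g.keys := fun hmem =>
        by rw [(PySem.Dict.contains_iff_mem_keys g c).mpr hmem] at hgcf; exact absurd hgcf (by decide)
      have hInvB : pvGInv (pvStepB g p) := by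
        constructor
        · rw [hstepB, PySem.Dict.keys_insert_of_not_contains g _ hgcf]
          refine List.Nodup.append hgk (List.nodup_singleton c) ?_
          intro a ha hac
          rw [List.mem_singleton.mp hac] at ha
          exact hckeys ha
        · intro q hq
          rw [hgB] at hq
          rcases List.mem_append.mp hq with hq1 | hq2
          · exact hgq q hq1
          · rw [List.mem_singleton.mp hq2]
            exact ⟨by simp, fun r hr => by rw [List.mem_singleton.mp hr]; exact ⟨hpnd, rfl⟩⟩
      have hstepA : pvStepA m p = m.insert c p.2 := by
        by_cases hp1 : p.1 = true <;> simp [pvStepA, hp1, hmcf, ← hcdef]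
      have hrel : (pvStepA m p).items = (pvStepB g p).items.map pvF := by
        rw [hstepA, PySem.Dict.items_insert_of_not_contains m _ hmcf, hgB, hmg, List.map_append]
        simp only [List.map_cons, List.map_nil, pvF]
        rw [pvCollapse_single p hpnd]
      exact ih _ _ htl hInvB hrel

-- skipping untagged funds / merging tagged funds, through List.foldl over a map
lemma pv_foldl_false (l : List (PySem.Dict String String)) (b : PySem.Dict String String) :
    (l.map (fun d => ((false : Bool), d))).foldl
      (fun base p => if p.1 then pvMergeZ base p.2 else base) b = b := by
  rw [List.foldl_map]
  induction l generalizing b with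
  | nil => rfl
  | cons z t ih => simpa using ih b

lemma pv_foldl_true (l : List (PySem.Dict String String)) (b : PySem.Dict String String) :
    (l.map (fun d => ((true : Bool), d))).foldl
      (fun base p => if p.1 then pvMergeZ base p.2 else base) b
      = l.foldl (fun base z => pvMergeZ base z) b := by
  rw [List.foldl_map]
  simp

-- per-code: A's collapsed group equals B's find/filter computation
lemma pv_percode (sse_funds szse_funds : List (List (String × String))) (c : String)
    (hc : ∃ f ∈ sse_funds ++ szse_funds, (pvDictOf f).getD "code" "" = c) :
    (pvCollapse ((sse_funds.map (fun f => ((false : Bool), pvDictOf f))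
        ++ szse_funds.map (fun f => ((true : Bool), pvDictOf f))).filter
          (fun p => p.2.getD "code" "" == c))).items
      = pvBval sse_funds szse_funds c := by
  have hfilt : ∀ (l : List (List (String × String))) (t : Bool),
      (l.map (fun f => (t, pvDictOf f))).filter (fun p => p.2.getD "code" "" == c)
        = ((l.map pvDictOf).filter (fun z => z.getD "code" "" == c)).map (fun d => (t, d)) := by
    intro l t
    rw [List.filter_map, List.filter_map, List.map_map]
    rfl
  rw [List.filter_append, hfilt _ false, hfilt _ true]
  unfold pvBval
  rw [← List.head?_filter]
  generalize hsFdef : (sse_funds.map pvDictOf).filter (fun z => z.getD "code" "" == c) = sF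
  generalize hzFdef : (szse_funds.map pvDictOf).filter (fun z => z.getD "code" "" == c) = zF
  cases hs : sF with
  | cons b rest =>
    simp only [List.head?_cons, pvBcore]
    unfold pvCollapse
    rw [List.map_cons, List.cons_append, List.headD_cons, List.foldl_cons]
    have hb1 : (if (false : Bool) then pvMergeZ b b else b) = b := by simp
    rw [hb1, List.foldl_append, pv_foldl_false, pv_foldl_true]
  | nil =>
    simp only [List.head?_nil, pvBcore]
    -- no sse fund has code c, so some szse fund does: zF ≠ []
    obtain ⟨f, hf, hfc⟩ := hc
    have hzne : zF ≠ [] := by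
      rcases List.mem_append.mp hf with h1 | h2
      · exfalso
        have : pvDictOf f ∈ sF := by
          rw [← hsFdef]
          exact List.mem_filter.mpr ⟨List.mem_map_of_mem h1, by simp [hfc]⟩
        rw [hs] at this
        exact absurd this (List.not_mem_nil)
      · intro hnil
        have : pvDictOf f ∈ zF := by
          rw [← hzFdef]
          exact List.mem_filter.mpr ⟨List.mem_map_of_mem h2, by simp [hfc]⟩
        rw [hnil] at this
        exact absurd this (List.not_mem_nil)
    match zF, hzne with
    | z0 :: zr, _ =>
      have hz0nd : z0.keys.Nodup := by
        have hz0 : z0 ∈ (szse_funds.map pvDictOf).filter (fun z => z.getD "code" "" == c) := by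
          rw [hzFdef]; exact List.mem_cons_self
        obtain ⟨f0, _, hf0⟩ := List.mem_map.mp (List.mem_filter.mp hz0).1
        rw [← hf0]
        exact PySem.Dict.nodup_keys_ofList f0
      unfold pvCollapse
      simp only [List.map_nil, List.nil_append, List.map_cons, List.headD_cons, List.foldl_cons,
        List.tail_cons]
      rw [if_pos trivial, pvMergeZ_self z0 hz0nd, pv_foldl_true]

theorem merge_funds_spec : Claim_equal_merge_funds := by
  intro sse szse _ _
  show merge_funds sse szse = merge_funds_alt sse szse
  have hL : ∀ p ∈ (sse.map (fun f => (false, pvDictOf f)) ++ szse.map (fun f => (true, pvDictOf f))),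
      p.2.keys.Nodup := by
    intro p hp
    rcases List.mem_append.mp hp with h1 | h2
    · obtain ⟨f, _, hf⟩ := List.mem_map.mp h1
      rw [← hf]; exact PySem.Dict.nodup_keys_ofList f
    · obtain ⟨f, _, hf⟩ := List.mem_map.mp h2
      rw [← hf]; exact PySem.Dict.nodup_keys_ofList f
  obtain ⟨hGI, hrel⟩ := pv_inv (sse.map (fun f => (false, pvDictOf f)) ++ szse.map (fun f => (true, pvDictOf f)))
    PySem.Dict.empty PySem.Dict.empty hL ⟨by simp [PySem.Dict.keys, PySem.Dict.empty], by simp [PySem.Dict.empty]⟩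
    (by simp [PySem.Dict.empty])
  set L := sse.map (fun f => (false, pvDictOf f)) ++ szse.map (fun f => (true, pvDictOf f)) with hLdef
  set g := L.foldl pvStepB PySem.Dict.empty with hgdef
  set m := L.foldl pvStepA PySem.Dict.empty with hmdef
  have hA : merge_funds sse szse
      = (PySem.List.sorted m.values (fun x => x.getD "code" "") false).map (fun d => d.items) := by
    rw [hmdef, hLdef, List.foldl_append, List.foldl_map, List.foldl_map]
    rfl
  have hkeys : g.keys = PySem.Set.ofList (((sse ++ szse).map pvDictOf).map (fun f => f.getD "code" "")) := by
    rw [hgdef]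
    have : L.foldl pvStepB PySem.Dict.empty
        = L.foldl (fun d x => d.modify ((fun p => p.2.getD "code" "")  x) []
            ((fun (_ : PySem.Dict String (List (Bool × PySem.Dict String String))) (p : Bool × PySem.Dict String String) (l : List (Bool × PySem.Dict String String)) => l ++ [p]) d x)) PySem.Dict.empty := rfl
    rw [this, PySem.Dict.keys_foldl_modify_key]
    have hmapkey : L.map (fun p => p.2.getD "code" "") = ((sse ++ szse).map pvDictOf).map (fun f => f.getD "code" "") := by
      rw [hLdef]
      simp only [List.map_append, List.map_map]
      rfl
    rw [hmapkey]
    simp [PySem.Set.update, PySem.Set.ofList_eq_foldl, PySem.Dict.keys_empty]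
  have hgetD : ∀ c, g.getD c [] = L.filter (fun p => p.2.getD "code" "" == c) := by
    intro c
    rw [hgdef]
    have hfold : L.foldl pvStepB PySem.Dict.empty
        = (L.map (fun p => (p.2.getD "code" "", p))).foldl
            (fun d q => d.modify q.1 [] (fun x => x ++ [q.2])) PySem.Dict.empty := by
      rw [List.foldl_map]
      rfl
    rw [hfold, PySem.Dict.getD_foldl_modify_append, List.filter_map]
    simp only [Function.comp_def, PySem.Dict.getD_empty, List.nil_append, List.map_map]
    exact List.map_id _
  have hB : merge_funds_alt sse szse
      = (PySem.List.sorted g.keys (fun c => c) false).map (pvBval sse szse) := by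
    show (PySem.List.sorted (PySem.Set.ofList (((sse ++ szse).map pvDictOf).map (fun f => f.getD "code" ""))) (fun c => c) false).foldl
        (fun result code => result ++ [pvBval sse szse code]) []
      = (PySem.List.sorted g.keys (fun c => c) false).map (pvBval sse szse)
    rw [← hkeys, PySem.List.foldl_append_singleton_eq_map]
    rfl
  rw [hA, hB]
  have hvals : m.values = g.keys.map (fun k => pvCollapse (g.getD k [])) := by
    show m.items.map Prod.snd = _
    rw [hrel, PySem.Dict.items_eq_map_keys g hGI.1 [], List.map_map, List.map_map]
    rfl
  have hkey : ∀ k ∈ g.keys, (pvCollapse (g.getD k [])).getD "code" "" = k := by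
    intro k hk
    have hmem : (k, g.getD k []) ∈ g.items := by
      rw [PySem.Dict.items_eq_map_keys g hGI.1 []]
      exact List.mem_map_of_mem hk
    have h := hGI.2 _ hmem
    exact pvCollapse_code _ _ h.1 h.2
  have hperm : ((PySem.List.sorted g.keys (fun c => c) false).map
      (fun k => pvCollapse (g.getD k []))).Perm m.values := by
    rw [hvals]
    exact (PySem.List.sorted_perm g.keys (fun c => c) false).map _
  have hksnd : (PySem.List.sorted g.keys (fun c => c) false).Nodup :=
    ((PySem.List.sorted_perm g.keys (fun c => c) false).nodup_iff).mpr hGI.1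
  have hpwlt : (PySem.List.sorted g.keys (fun c => c) false).Pairwise (· < ·) := by
    have hle := PySem.List.sorted_pairwise g.keys (fun c => c)
    exact (hle.and hksnd).imp (fun hab => lt_of_le_of_ne hab.1 hab.2)
  have hpair : ((PySem.List.sorted g.keys (fun c => c) false).map
      (fun k => pvCollapse (g.getD k []))).Pairwise
      (fun a b => a.getD "code" "" < b.getD "code" "") := by
    rw [List.pairwise_map]
    refine hpwlt.imp_of_mem ?_
    intro a b ha hb hab
    have ha' : a ∈ g.keys := (PySem.List.sorted_perm g.keys (fun c => c) false).mem_iff.mp ha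
    have hb' : b ∈ g.keys := (PySem.List.sorted_perm g.keys (fun c => c) false).mem_iff.mp hb
    rw [hkey a ha', hkey b hb']
    exact hab
  rw [PySem.List.sorted_eq_of_perm_of_pairwise_lt m.values _ (fun x => x.getD "code" "") hperm hpair,
    List.map_map]
  refine List.map_congr_left ?_
  intro c hc
  have hc' : c ∈ g.keys := (PySem.List.mem_sorted _ _ _ _).mp hc
  have hcex : ∃ f ∈ sse ++ szse, (pvDictOf f).getD "code" "" = c := by
    rw [hkeys] at hc'
    have := (PySem.Set.mem_ofList _ _).mp hc'
    obtain ⟨d, hd, hdc⟩ := List.mem_map.mp this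
    obtain ⟨f, hf, hfd⟩ := List.mem_map.mp hd
    exact ⟨f, hf, by rw [hfd, hdc]⟩
  show (pvCollapse (g.getD c [])).items = pvBval sse szse c
  rw [hgetD c, hLdef]
  exact pv_percode sse szse c hcex
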